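-- pv_equiv track=rewrite | github.com/espitia01/TwisterASEv2 | Src/lammps_writers/input_generator.py | _count_tmd_interactions
-- ===== SOURCE A (Python) =====
-- def _should_interact_tmd(class1, class2):
--     """Determine if two TMD atom types should have interlayer interaction."""
--     return ((class1 == 'TM' and class2 == 'TM') or
--             (class1 == 'TM' and class2 == 'X_l') or
--             (class1 == 'X_u' and class2 in ['TM', 'X_l']))
--
-- def _count_tmd_interactions(layer_classifications, material_info):
--     """Count number of TMD interlayer interactions."""
--     count = 0
--     for i in range(len(layer_classifications) - 1):
--         for tag_i, class_i, sym_i in layer_classifications[i]: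
--             for tag_j, class_j, sym_j in layer_classifications[i+1]:
--                 if _should_interact_tmd(class_i, class_j):
--                     count += 1
--     return count
-- ===== SOURCE B (Python) =====
-- def _count_tmd_interactions(layer_classifications, material_info):
--     """Count number of TMD interlayer interactions.
--
--     A pair (class_i, class_j) interacts iff class_i is TM or X_u and
--     class_j is TM or X_l, so tally those class counts once per layer and
--     multiply across adjacent layers.
--     """
--     sums = [(sum(1 for _, c, _ in layer if c in ('TM', 'X_u')),
--              sum(1 for _, c, _ in layer if c in ('TM', 'X_l')))
--             for layer in layer_classifications]
--     return sum(u * l for (u, _), (_, l) in zip(sums, sums[1:]))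
-- ===== Notes on version B (the rewrite author's own statement) =====
-- stated objective: faster
-- what changed: Replaced the nested per-atom pair scan over adjacent layers by a one-pass tally of upper-facing (TM/X_u) and lower-facing (TM/X_l) class counts per layer, multiplying the matching counts across adjacent layers.
import Mathlib
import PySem

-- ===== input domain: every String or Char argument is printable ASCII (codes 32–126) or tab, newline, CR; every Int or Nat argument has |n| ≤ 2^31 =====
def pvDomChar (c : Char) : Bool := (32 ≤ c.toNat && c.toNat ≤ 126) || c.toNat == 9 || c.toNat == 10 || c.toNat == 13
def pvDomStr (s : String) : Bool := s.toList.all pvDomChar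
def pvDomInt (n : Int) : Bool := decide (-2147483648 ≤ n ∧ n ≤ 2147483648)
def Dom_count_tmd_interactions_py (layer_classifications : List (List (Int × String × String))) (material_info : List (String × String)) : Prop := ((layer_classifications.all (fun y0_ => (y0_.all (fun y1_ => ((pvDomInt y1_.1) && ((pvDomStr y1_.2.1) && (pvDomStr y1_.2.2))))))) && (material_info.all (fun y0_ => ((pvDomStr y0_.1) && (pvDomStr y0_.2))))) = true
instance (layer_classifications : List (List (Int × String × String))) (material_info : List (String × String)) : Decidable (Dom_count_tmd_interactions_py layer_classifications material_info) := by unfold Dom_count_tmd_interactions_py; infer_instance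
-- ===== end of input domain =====

-- B replaces the nested per-atom pair scan by per-layer class-count tallies multiplied across adjacent layers (asymptotically faster).


-- ===== PORT A =====
def pvShouldInteractTmd (class1 class2 : String) : Bool :=
  (class1 == "TM" && class2 == "TM") ||
  (class1 == "TM" && class2 == "X_l") ||
  (class1 == "X_u" && (class2 == "TM" || class2 == "X_l"))

def count_tmd_interactions_py (layer_classifications : List (List (Int × String × String))) (material_info : List (String × String)) : Int :=
  (PySem.List.pyRange 0 ((layer_classifications.length : Int) - 1) 1).foldl
    (fun count i =>
      (PySem.List.pyGetD layer_classifications i []).foldl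
        (fun c a =>
          (PySem.List.pyGetD layer_classifications (i + 1) []).foldl
            (fun c b => if pvShouldInteractTmd a.2.1 b.2.1 then c + 1 else c) c) count) 0

-- ===== PORT B =====
def count_tmd_interactions_py_alt (layer_classifications : List (List (Int × String × String))) (material_info : List (String × String)) : Int :=
  let sums := layer_classifications.map (fun layer =>
    ((layer.countP (fun t => t.2.1 == "TM" || t.2.1 == "X_u") : Int),
     (layer.countP (fun t => t.2.1 == "TM" || t.2.1 == "X_l") : Int)))
  ((sums.zip sums.tail).map (fun p => p.1.1 * p.2.2)).sum

-- ===== PRECONDITION & SPEC =====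
def Spec_count_tmd_interactions_py (layer_classifications : List (List (Int × String × String))) (material_info : List (String × String)) (out : Int) : Prop := out = count_tmd_interactions_py_alt layer_classifications material_info
instance (layer_classifications : List (List (Int × String × String))) (material_info : List (String × String)) (out : Int) : Decidable (Spec_count_tmd_interactions_py layer_classifications material_info out) := by unfold Spec_count_tmd_interactions_py; infer_instance

-- ===== CLAIM (what is proved, stated in full; the proofs are below) =====
def Claim_equal_count_tmd_interactions_py : Prop := ∀ (layer_classifications : List (List (Int × String × String))) (material_info : List (String × String)), Dom_count_tmd_interactions_py layer_classifications material_info → Spec_count_tmd_interactions_py layer_classifications material_info (count_tmd_interactions_py layer_classifications material_info)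

-- ===== LEMMAS AND PROOFS =====

-- the interaction predicate factors as (left is TM/X_u) && (right is TM/X_l)
theorem pvShould_eq (a b : String) :
    pvShouldInteractTmd a b = ((a == "TM" || a == "X_u") && (b == "TM" || b == "X_l")) := by
  unfold pvShouldInteractTmd
  cases h1 : a == "TM" <;> cases h2 : a == "X_u" <;> cases h3 : b == "TM" <;>
    cases h4 : b == "X_l" <;> simp

def pvCntU (layer : List (Int × String × String)) : Int :=
  (layer.countP (fun t => t.2.1 == "TM" || t.2.1 == "X_u") : Int)

def pvCntL (layer : List (Int × String × String)) : Int :=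
  (layer.countP (fun t => t.2.1 == "TM" || t.2.1 == "X_l") : Int)

theorem pv_inner (a : String) (lj : List (Int × String × String)) (c0 : Int) :
    lj.foldl (fun c b => if pvShouldInteractTmd a b.2.1 then c + 1 else c) c0
      = c0 + (if (a == "TM" || a == "X_u") then pvCntL lj else 0) := by
  induction lj generalizing c0 with
  | nil => simp [pvCntL]
  | cons x xs ih =>
    rw [List.foldl_cons, ih, pvShould_eq]
    simp only [pvCntL, List.countP_cons]
    cases hu : (a == "TM" || a == "X_u") <;>
      cases hx : (x.2.1 == "TM" || x.2.1 == "X_l") <;> simp [hu, hx] <;> push_cast <;> ring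

theorem pv_pair (li lj : List (Int × String × String)) (c0 : Int) :
    li.foldl (fun c a =>
        lj.foldl (fun c b => if pvShouldInteractTmd a.2.1 b.2.1 then c + 1 else c) c) c0
      = c0 + pvCntU li * pvCntL lj := by
  induction li generalizing c0 with
  | nil => simp [pvCntU]
  | cons x xs ih =>
    rw [List.foldl_cons, ih, pv_inner]
    simp only [pvCntU, List.countP_cons]
    cases hx : (x.2.1 == "TM" || x.2.1 == "X_u") <;> simp [hx] <;> push_cast <;> ring

-- the index range pairs up exactly the adjacent layers
theorem pv_range_zip (lcs : List (List (Int × String × String))) :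
    (PySem.List.pyRange 0 ((lcs.length : Int) - 1) 1).map
        (fun i => (PySem.List.pyGetD lcs i [], PySem.List.pyGetD lcs (i + 1) []))
      = lcs.zip lcs.tail := by
  apply List.ext_getElem
  · simp only [List.length_map, PySem.List.length_pyRange_one, List.length_zip,
      List.length_tail]
    omega
  · intro k h1 h2
    have hk : k < lcs.length - 1 := by
      have := h1
      simp only [List.length_map, PySem.List.length_pyRange_one] at this
      omega
    simp only [List.getElem_map, PySem.List.getElem_pyRange_one, List.getElem_zip,
      List.getElem_tail]
    have hk1 : k < lcs.length := by omega
    have hk2 : k + 1 < lcs.length := by omega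
    have e1 : ((0 : Int) + (k : Int)) = ((k : Nat) : Int) := by push_cast; ring
    have e2 : ((k : Int) + 1) = (((k + 1 : Nat)) : Int) := by push_cast; ring
    rw [e1, e2, PySem.List.pyGetD_natCast, PySem.List.pyGetD_natCast]
    simp [List.getD, hk1, hk2]

theorem pv_foldl_sum {α : Type} (l : List α) (h : α → Int) (c : Int) :
    l.foldl (fun acc x => acc + h x) c = c + (l.map h).sum := by
  induction l generalizing c with
  | nil => simp
  | cons x xs ih => simp [ih]; ring

-- ===== VERDICT (by name: the statement is the Claim_ definition above) =====
theorem count_tmd_interactions_py_spec : Claim_equal_count_tmd_interactions_py := by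
  intro lcs mi _
  unfold Spec_count_tmd_interactions_py count_tmd_interactions_py count_tmd_interactions_py_alt
  have hbody : ∀ (count : Int) (i : Int),
      (PySem.List.pyGetD lcs i []).foldl
        (fun c a => (PySem.List.pyGetD lcs (i + 1) []).foldl
          (fun c b => if pvShouldInteractTmd a.2.1 b.2.1 then c + 1 else c) c) count
      = count + pvCntU (PySem.List.pyGetD lcs i []) * pvCntL (PySem.List.pyGetD lcs (i + 1) []) :=
    fun count i => pv_pair _ _ _
  calc
    (PySem.List.pyRange 0 ((lcs.length : Int) - 1) 1).foldl
      (fun count i =>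
        (PySem.List.pyGetD lcs i []).foldl
          (fun c a => (PySem.List.pyGetD lcs (i + 1) []).foldl
            (fun c b => if pvShouldInteractTmd a.2.1 b.2.1 then c + 1 else c) c) count) 0
      = (PySem.List.pyRange 0 ((lcs.length : Int) - 1) 1).foldl
          (fun count i =>
            count + pvCntU (PySem.List.pyGetD lcs i []) * pvCntL (PySem.List.pyGetD lcs (i + 1) [])) 0 := by
            exact PySem.List.foldl_congr_mem _ _ _ _ (fun acc x _ => hbody acc x)
    _ = 0 + ((PySem.List.pyRange 0 ((lcs.length : Int) - 1) 1).map
          (fun i => pvCntU (PySem.List.pyGetD lcs i []) * pvCntL (PySem.List.pyGetD lcs (i + 1) []))).sum := by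
            exact pv_foldl_sum _ _ _
    _ = ((lcs.zip lcs.tail).map (fun p => pvCntU p.1 * pvCntL p.2)).sum := by
          rw [← pv_range_zip lcs, List.map_map, Int.zero_add]
          exact congrArg List.sum (List.map_congr_left (fun i _ => rfl))
    _ = _ := by
          show _ = (((lcs.map (fun layer =>
              ((layer.countP (fun t => t.2.1 == "TM" || t.2.1 == "X_u") : Int),
               (layer.countP (fun t => t.2.1 == "TM" || t.2.1 == "X_l") : Int)))).zip
            ((lcs.map (fun layer =>
              ((layer.countP (fun t => t.2.1 == "TM" || t.2.1 == "X_u") : Int),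
               (layer.countP (fun t => t.2.1 == "TM" || t.2.1 == "X_l") : Int)))).tail)).map
            (fun p => p.1.1 * p.2.2)).sum
          rw [← List.map_tail, List.zip_map, List.map_map]
          exact congrArg List.sum (List.map_congr_left (fun p _ => rfl))
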